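-- pv_equiv track=rewrite | github.com/nilankh/codes | StartingOfDS/priorityqueues2/BuyTheTicket.py | time_required
-- ===== SOURCE A (Python) =====
-- import heapq
--
-- def time_required(lst, k):
--     q=lst[k]
--     heapq._heapify_max(lst)
--     time=0
--     while True:
--         ele_max = heapq._heappop_max(lst)
--         time+=1
--         if ele_max==q:
--             return time
-- ===== SOURCE B (Python) =====
-- def time_required(lst, k):
--     q = lst[k]
--     return 1 + sum(1 for x in lst if x > q)
-- ===== Notes on version B (the rewrite author's own statement) =====
-- stated objective: faster
-- what changed: replaces the max-heapify + repeated heappop loop with a single pass counting elements strictly greater than lst[k] (answer = that count + 1), and B does not mutate lst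
import Mathlib
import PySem

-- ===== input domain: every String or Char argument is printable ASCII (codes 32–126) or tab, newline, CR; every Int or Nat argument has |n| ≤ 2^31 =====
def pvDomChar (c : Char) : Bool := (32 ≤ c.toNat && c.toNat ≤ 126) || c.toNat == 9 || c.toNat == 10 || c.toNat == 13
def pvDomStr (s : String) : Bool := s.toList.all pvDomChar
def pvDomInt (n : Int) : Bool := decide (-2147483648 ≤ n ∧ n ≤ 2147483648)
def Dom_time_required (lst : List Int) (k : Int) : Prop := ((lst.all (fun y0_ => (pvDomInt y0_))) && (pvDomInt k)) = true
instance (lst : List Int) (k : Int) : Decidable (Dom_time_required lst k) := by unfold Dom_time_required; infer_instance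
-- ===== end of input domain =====

-- B replaces A's heapify + repeated heappop loop with one pass counting elements > lst[k] (faster);
-- equivalence is about the RETURN value only: Python A empties lst in place, B leaves it untouched.

-- ===== PORT A =====
-- A's heapq calls are ported at multiset level: _heapify_max is the identity on the
-- contents, _heappop_max removes and returns the maximum of the remaining elements
-- (exact for A's observable value, which depends only on the multiset).
-- fuel = lst.length suffices because lst[k] is in the list, so the loop returns
-- before the heap is exhausted.
def timeLoopA (fuel : Nat) (xs : List Int) (q : Int) (time : Int) : Int :=
  match fuel with
  | 0 => time            -- unreachable under Pre_
  | fuel + 1 =>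
    match PySem.List.max? xs (fun x => x) with
    | none => time       -- pop from empty heap: A raises IndexError; unreachable under Pre_
    | some m =>
      if m = q then time + 1
      else timeLoopA fuel ((PySem.List.remove? xs m).getD []) q (time + 1)

def time_required (lst : List Int) (k : Int) : Int :=
  match PySem.List.pyGet? lst k with
  | none => 0            -- lst[k] raises IndexError: excluded by Pre_
  | some q => timeLoopA lst.length lst q 0

-- ===== PORT B =====
def time_required_alt (lst : List Int) (k : Int) : Int :=
  match PySem.List.pyGet? lst k with
  | none => 0            -- lst[k] raises IndexError: excluded by Pre_
  | some q => 1 + (List.countP (fun x => decide (q < x)) lst : Int)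

-- ===== PRECONDITION & SPEC =====
-- Pre_ excludes exactly the inputs where A raises IndexError: k out of Python range for lst.
def Pre_time_required (lst : List Int) (k : Int) : Prop :=
  PySem.Raise.InRange lst.length k
instance (lst : List Int) (k : Int) : Decidable (Pre_time_required lst k) := by
  unfold Pre_time_required; infer_instance

def pvWitness_time_required : List Int × Int := ([3, 1, 4, 1, 5], 2)

def Spec_time_required (lst : List Int) (k : Int) (out : Int) : Prop := out = time_required_alt lst k
instance (lst : List Int) (k : Int) (out : Int) : Decidable (Spec_time_required lst k out) := by unfold Spec_time_required; infer_instance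

-- ===== CLAIM (what is proved, stated in full; the proofs are below) =====
def Claim_equal_time_required : Prop := ∀ (lst : List Int) (k : Int), Dom_time_required lst k → Pre_time_required lst k → Spec_time_required lst k (time_required lst k)

-- ===== LEMMAS AND PROOFS =====

theorem timeLoopA_eq (fuel : Nat) :
    ∀ (xs : List Int) (q time : Int), q ∈ xs → xs.length ≤ fuel →
      timeLoopA fuel xs q time = time + 1 + (List.countP (fun x => decide (q < x)) xs : Int) := by
  induction fuel with
  | zero =>
    intro xs q time hq hlen
    exact absurd (List.length_pos_of_mem hq) (by omega)
  | succ fuel ih =>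
    intro xs q time hq hlen
    have hne : xs ≠ [] := List.ne_nil_of_mem hq
    obtain ⟨m, hm⟩ : ∃ m, PySem.List.max? xs (fun x => x) = some m := by
      cases hmx : PySem.List.max? xs (fun x => x) with
      | none => exact absurd ((PySem.List.max?_eq_none_iff xs _).mp hmx) hne
      | some m => exact ⟨m, rfl⟩
    have hmmem : m ∈ xs := PySem.List.max?_mem hm
    have hmax : ∀ y ∈ xs, y ≤ m := fun y hy => PySem.List.max?_isMax hm y hy
    simp only [timeLoopA, hm]
    by_cases hmq : m = q
    · subst hmq
      have hc0 : List.countP (fun x => decide (m < x)) xs = 0 := by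
        rw [List.countP_eq_zero]
        intro x hx
        simpa using not_lt.mpr (hmax x hx)
      simp [hc0]
    · have hqm : q < m := lt_of_le_of_ne (hmax q hq) (fun h => hmq h.symm)
      have hrem : PySem.List.remove? xs m = some (xs.erase m) :=
        PySem.List.remove?_eq_some_erase xs m hmmem
      have hperm : xs.Perm (m :: xs.erase m) := List.perm_cons_erase hmmem
      have hqmem' : q ∈ xs.erase m := by
        have := hperm.mem_iff.mp hq
        simp only [List.mem_cons] at this
        rcases this with h | h
        · exact absurd h.symm hmq
        · exact h
      have hlen' : (xs.erase m).length ≤ fuel := by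
        have := hperm.length_eq
        simp at this
        omega
      rw [hrem]
      simp only [Option.getD_some]
      rw [if_neg hmq, ih (xs.erase m) q (time + 1) hqmem' hlen']
      have hcount : List.countP (fun x => decide (q < x)) xs
          = List.countP (fun x => decide (q < x)) (xs.erase m) + 1 := by
        rw [hperm.countP_eq]
        simp [hqm]
      rw [hcount]
      push_cast
      ring

-- ===== VERDICT (by name: the statement is the Claim_ definition above) =====
theorem time_required_spec : Claim_equal_time_required := by
  intro lst k _ hpre
  unfold Spec_time_required time_required time_required_alt
  cases hg : PySem.List.pyGet? lst k with
  | none =>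
    exact absurd hpre ((PySem.List.pyGet?_eq_none_iff lst k).mp hg)
  | some q =>
    have hq : q ∈ lst := PySem.List.mem_of_pyGet?_eq_some lst hg
    simp only []
    rw [timeLoopA_eq lst.length lst q 0 hq le_rfl]
    ring
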